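-- pv_equiv track=rewrite | github.com/ProvotL/TIPE | main.py | liste_des_partitions
-- ===== SOURCE A (Python) =====
-- def liste_des_partitions(liste_de_positions):
--
--     partitions_possibles = []
--
--     # Si la liste de positions est vide, la seule partition possible est ("","")
--     if liste_de_positions ==  [] :
--         partitions_possibles.append(("",""))
--         return partitions_possibles
--
--
--     Liste_des_positions_normales = [] #Liste des postions qui ne sont pas des simples points
--
--     partitions_nulles = [] #Liste des partitions qui n'ont que des simples points
--     partitions_normales = [] #Liste des partitions de positions normales
--
--     #Etape 1 : On compte et enlève les positions "0."
--
--     n = 0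
--     for bj in liste_de_positions :
--         if bj == "0." :
--             n += 1
--         else :
--             Liste_des_positions_normales.append(bj)
--
--     #Etape 2 : On fait les partitions avec les 0. (il y en a n+1 possibles)
--
--     if n != 0 :
--         r2 = ""
--         r1 = ""
--         for i in range(n):
--             r2 += "0."
--         partitions_nulles.append((r1,r2))
--         for i in range(n):
--             r1 += "0."
--             r2 = r2[:-2]
--             partitions_nulles.append((r1,r2))
--
--
--     #Etape 3 : On fait les partitions normales
--
--     n = len(Liste_des_positions_normales)
--
--     if n != 0 :
--         q = 2**n
--         for i in range(q):
--             r1 = ""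
--             r2 = ""
--
--             for j in range(n):
--                 #Ce test est un peu bizarre, c'est normal, il faut réfléchir un peu pour comprendre : On veut toutes les combinaisons donc on se sert des valeurs en bits pour le faire
--                 if (i & (2 ** j)) == (2 ** j):
--                     r1 += Liste_des_positions_normales[j]
--                 else :
--                     r2 += Liste_des_positions_normales[j]
--
--             partitions_normales.append((r1,r2))
--
--
--     #Etape 4 on complete l'ensemble des partitions
--
--     if partitions_nulles == []:
--         partitions_possibles = partitions_normales
--         return partitions_possibles
--
--     if partitions_normales == [] :
--         partitions_possibles = partitions_nulles
--         return partitions_possibles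
--
--     for ci in partitions_nulles :
--         for cj in partitions_normales :
--             r1 = ""
--             r1 += ci[0]
--             r1 += cj[0]
--             r2 = ""
--             r2 += ci[1]
--             r2 += cj[1]
--
--             partitions_possibles.append((r1,r2))
--
--     return partitions_possibles
-- ===== SOURCE B (Python) =====
-- def _split(xs):
--     if not xs:
--         return [("", "")]
--     p, rest = xs[0], _split(xs[1:])
--     return [pair for (l, r) in rest for pair in ((l, p + r), (p + l, r))]
--
--
-- def liste_des_partitions(liste_de_positions):
--     if not liste_de_positions:
--         return [("", "")]
--     normales = [p for p in liste_de_positions if p != "0."]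
--     n = len(liste_de_positions) - len(normales)
--     nulles = [("0." * k, "0." * (n - k)) for k in range(n + 1)] if n else []
--     normales_parts = _split(normales) if normales else []
--     if not nulles:
--         return normales_parts
--     if not normales_parts:
--         return nulles
--     return [(c1 + d1, c2 + d2) for (c1, c2) in nulles for (d1, d2) in normales_parts]
-- ===== Notes on version B (the rewrite author's own statement) =====
-- stated objective: alternative
-- what changed: A's bit-mask double loop (for each i in range(2**n) re-scan all n positions testing i & 2**j) is replaced by a structural recursion that doubles the list of splits once per position, and A's two accumulating '0.'-loops are replaced by a direct comprehension ('0.'*k, '0.'*(n-k)) for k in range(n+1).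
import Mathlib
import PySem

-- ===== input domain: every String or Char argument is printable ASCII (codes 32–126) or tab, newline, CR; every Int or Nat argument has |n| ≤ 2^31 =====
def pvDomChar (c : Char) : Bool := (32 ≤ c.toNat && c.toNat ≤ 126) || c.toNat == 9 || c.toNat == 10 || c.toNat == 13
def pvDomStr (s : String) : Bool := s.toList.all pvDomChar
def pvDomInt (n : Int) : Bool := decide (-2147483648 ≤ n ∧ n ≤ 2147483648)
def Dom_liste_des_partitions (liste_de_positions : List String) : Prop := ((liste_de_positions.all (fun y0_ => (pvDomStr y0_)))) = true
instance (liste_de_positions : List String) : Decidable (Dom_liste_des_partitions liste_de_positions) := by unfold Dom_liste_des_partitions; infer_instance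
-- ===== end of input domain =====

-- B replaces A's bit-mask double loop over range(2**n) by a structural recursion that
-- doubles the split list once per element, and builds the n+1 "0." splits by a direct
-- comprehension instead of A's two accumulating loops (objective: alternative).
-- Convention: Python str values are carried as their character lists (List Char, exact per PySem)
-- inside both ports and converted to String with String.ofList only in the returned pairs.

-- ===== PORT A =====
-- shared boundary conversion List Char × List Char → String × String (type convention only)
def pvToStrPair (p : List Char × List Char) : String × String := (String.ofList p.1, String.ofList p.2)

def liste_des_partitions (liste_de_positions : List String) : List (String × String) :=
  -- if liste_de_positions == []: return [("","")]
  if liste_de_positions = [] then [("", "")]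
  else
    -- Etape 1 : n = number of "0.", Liste_des_positions_normales = the rest (one loop)
    let st := liste_de_positions.foldl
      (fun (st : Nat × List String) bj =>
        if bj = "0." then (st.1 + 1, st.2) else (st.1, st.2 ++ [bj])) (0, [])
    let n := st.1
    let normales := st.2
    -- Etape 2 : the n+1 partitions made only of "0."
    let partitions_nulles : List (List Char × List Char) :=
      if n ≠ 0 then
        let r2 := (List.range n).foldl (fun r _ => r ++ ['0', '.']) []   -- r2 += "0." n times
        let r1 : List Char := []
        -- for i in range(n): r1 += "0."; r2 = r2[:-2]; append (r1,r2)
        let st2 := (List.range n).foldl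
          (fun (st : List (List Char × List Char) × List Char × List Char) _ =>
            let r1' := st.2.1 ++ ['0', '.']
            let r2' := PySem.List.slice st.2.2 none (some (-2))
            (st.1 ++ [(r1', r2')], r1', r2'))
          ([(r1, r2)], r1, r2)
        st2.1
      else []
    -- Etape 3 : the 2**m bit-mask partitions of the normal positions
    let m := normales.length
    let partitions_normales : List (List Char × List Char) :=
      if m ≠ 0 then
        (PySem.List.pyRange 0 ((2 : Int) ^ m) 1).foldl
          (fun acc i =>
            let rs := (PySem.List.pyRange 0 (m : Int) 1).foldl
              (fun (rs : List Char × List Char) j =>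
                -- 2 ** j with j from range(m), so j ≥ 0: (2 : Int) ^ j.toNat is exact
                if PySem.Int.band i ((2 : Int) ^ j.toNat) = (2 : Int) ^ j.toNat then
                  (rs.1 ++ (PySem.List.pyGetD normales j "").toList, rs.2)
                else
                  (rs.1, rs.2 ++ (PySem.List.pyGetD normales j "").toList))
              ([], [])
            acc ++ [rs]) []
      else []
    -- Etape 4 : combine
    if partitions_nulles = [] then partitions_normales.map pvToStrPair
    else if partitions_normales = [] then partitions_nulles.map pvToStrPair
    else
      (partitions_nulles.foldl
        (fun acc ci =>
          partitions_normales.foldl (fun acc2 cj => acc2 ++ [(ci.1 ++ cj.1, ci.2 ++ cj.2)]) acc)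
        []).map pvToStrPair

-- ===== PORT B =====
-- "0." * k
def pvRep (k : Nat) : List Char := (List.replicate k ['0', '.']).flatten

-- _split: doubles the list of splits once per element, first element toggling fastest
def pvSplit : List String → List (List Char × List Char)
  | [] => [([], [])]
  | p :: rest =>
    (pvSplit rest).flatMap (fun lr => [(lr.1, p.toList ++ lr.2), (p.toList ++ lr.1, lr.2)])

def liste_des_partitions_alt (liste_de_positions : List String) : List (String × String) :=
  if liste_de_positions = [] then [("", "")]
  else
    let normales := liste_de_positions.filter (fun p => p ≠ "0.")
    let n := liste_de_positions.length - normales.length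
    let nulles : List (List Char × List Char) :=
      if n ≠ 0 then (List.range (n + 1)).map (fun k => (pvRep k, pvRep (n - k))) else []
    let norms : List (List Char × List Char) := if normales ≠ [] then pvSplit normales else []
    if nulles = [] then norms.map pvToStrPair
    else if norms = [] then nulles.map pvToStrPair
    else
      (nulles.flatMap (fun c => norms.map (fun d => (c.1 ++ d.1, c.2 ++ d.2)))).map pvToStrPair

-- ===== PRECONDITION & SPEC =====
def Spec_liste_des_partitions (liste_de_positions : List String) (out : List (String × String)) : Prop := out = liste_des_partitions_alt liste_de_positions
instance (liste_de_positions : List String) (out : List (String × String)) : Decidable (Spec_liste_des_partitions liste_de_positions out) := by unfold Spec_liste_des_partitions; infer_instance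

-- ===== CLAIM (what is proved, stated in full; the proofs are below) =====
def Claim_equal_liste_des_partitions : Prop := ∀ (liste_de_positions : List String), Dom_liste_des_partitions liste_de_positions → Spec_liste_des_partitions liste_de_positions (liste_des_partitions liste_de_positions)

-- ===== LEMMAS AND PROOFS =====

-- Etape 1: the counting loop computes (count of "0.", filtered list)
lemma pv_step1 (L : List String) (n : Nat) (acc : List String) :
    L.foldl (fun (st : Nat × List String) bj =>
        if bj = "0." then (st.1 + 1, st.2) else (st.1, st.2 ++ [bj])) (n, acc)
      = (n + L.countP (fun p => p == "0."), acc ++ L.filter (fun p => p ≠ "0.")) := by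
  induction L generalizing n acc with
  | nil => simp
  | cons x L ih =>
    by_cases hx : x = "0." <;> simp [List.foldl_cons, hx, ih] <;> try omega

lemma pv_count_len (L : List String) :
    L.countP (fun p => p == "0.") = L.length - (L.filter (fun p => p ≠ "0.")).length := by
  induction L with
  | nil => simp
  | cons x L ih =>
    have := List.length_filter_le (fun p => !decide (p = "0.")) L
    by_cases hx : x = "0." <;> simp [hx, ih] <;> try omega
lemma pvRep_succ' (k : Nat) : pvRep (k + 1) = pvRep k ++ ['0', '.'] := by
  simp [pvRep, List.replicate_succ']

lemma pv_rep_init (k : Nat) (c : List Char) :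
    (List.range k).foldl (fun r _ => r ++ ['0', '.']) c = c ++ pvRep k := by
  induction k generalizing c with
  | zero => simp [pvRep]
  | succ k ih => simp [List.range_succ, ih, pvRep_succ']
lemma pvRep_length (k : Nat) : (pvRep k).length = 2 * k := by
  induction k with
  | zero => simp [pvRep]
  | succ k ih => simp [pvRep_succ', ih]; omega
lemma pv_rep_slice (m : Nat) (hm : 1 ≤ m) :
    PySem.List.slice (pvRep m) none (some (-2)) = pvRep (m - 1) := by
  obtain ⟨m, rfl⟩ : ∃ k, m = k + 1 := ⟨m - 1, by omega⟩
  rw [PySem.List.slice_to_neg_ofNat _ 2 (by omega), pvRep_succ']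
  simp only [Nat.add_sub_cancel, List.length_append, pvRep_length]
  rw [show 2 * m + ['0', '.'].length - 2 = (pvRep m).length by simp [pvRep_length]]
  exact List.take_left' rfl
lemma pv_nulles_loop (n : Nat) (m : Nat) (hm : m ≤ n) :
    (List.range m).foldl
        (fun (st : List (List Char × List Char) × List Char × List Char) _ =>
          let r1' := st.2.1 ++ ['0', '.']
          let r2' := PySem.List.slice st.2.2 none (some (-2))
          (st.1 ++ [(r1', r2')], r1', r2'))
        ([(([] : List Char), pvRep n)], [], pvRep n)
      = ((List.range (m + 1)).map (fun k => (pvRep k, pvRep (n - k))), pvRep m, pvRep (n - m)) := by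
  induction m with
  | zero => simp [pvRep]
  | succ m ih =>
    rw [List.range_succ, List.foldl_append, ih (by omega)]
    simp only [List.foldl_cons, List.foldl_nil]
    rw [pv_rep_slice (n - m) (by omega), ← pvRep_succ']
    rw [show List.range (m + 1 + 1) = List.range (m + 1) ++ [m + 1] from List.range_succ]
    simp [show n - m - 1 = n - (m + 1) by omega]

-- Etape 3 machinery: Nat-level view of A's inner bit loop, and its recursive form
def pvNatInner (ys : List String) (i : Nat) (s : List Char × List Char) : List Char × List Char :=
  (List.range ys.length).foldl
    (fun rs j =>
      if i &&& 2 ^ j = 2 ^ j then (rs.1 ++ (ys.getD j "").toList, rs.2)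
      else (rs.1, rs.2 ++ (ys.getD j "").toList)) s

def pvBitsplit : List String → Nat → List Char × List Char
  | [], _ => ([], [])
  | x :: xs, i =>
    let lr := pvBitsplit xs (i / 2)
    if i % 2 = 1 then (x.toList ++ lr.1, lr.2) else (lr.1, x.toList ++ lr.2)


lemma pv_innerA_eq_natInner (ys : List String) (i : Nat) :
    (PySem.List.pyRange 0 (ys.length : Int) 1).foldl
        (fun (rs : List Char × List Char) j =>
          if PySem.Int.band (i : Int) ((2 : Int) ^ j.toNat) = (2 : Int) ^ j.toNat then
            (rs.1 ++ (PySem.List.pyGetD ys j "").toList, rs.2)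
          else
            (rs.1, rs.2 ++ (PySem.List.pyGetD ys j "").toList))
        ([], [])
      = pvNatInner ys i ([], []) := by
  rw [PySem.List.pyRange_zero_nat, List.foldl_map]
  unfold pvNatInner
  congr 1
  funext rs j
  have hc : (PySem.Int.band (↑i) ((2 : Int) ^ ((j : Int)).toNat) = (2 : Int) ^ ((j : Int)).toNat)
      ↔ (i &&& 2 ^ j = 2 ^ j) := by
    rw [Int.toNat_natCast, show ((2 : Int) ^ j) = ((2 ^ j : Nat) : Int) by push_cast; ring,
      PySem.Int.band_natCast, Nat.cast_inj]
  simp only [PySem.List.pyGetD_natCast, hc]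

lemma pv_natInner_cons (x : String) (xs : List String) (i : Nat) (s : List Char × List Char) :
    pvNatInner (x :: xs) i s
      = pvNatInner xs (i / 2)
          (if i % 2 = 1 then (s.1 ++ x.toList, s.2) else (s.1, s.2 ++ x.toList)) := by
  unfold pvNatInner
  rw [show (x :: xs).length = xs.length + 1 from rfl, List.range_succ_eq_map, List.foldl_cons,
    List.foldl_map]
  have hbit : ∀ j : Nat, (i &&& 2 ^ (j + 1) = 2 ^ (j + 1)) ↔ (i / 2 &&& 2 ^ j = 2 ^ j) := by
    intro j
    rw [Nat.and_two_pow, Nat.and_two_pow, Nat.testBit_add_one]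
    rcases h : (i / 2).testBit j <;> simp <;> try omega
  have h0 : (i &&& 2 ^ 0 = 2 ^ 0) ↔ i % 2 = 1 := by
    simp [Nat.and_one_is_mod]
  congr 1
  · funext rs j
    simp only [Nat.succ_eq_add_one, hbit j, List.getD_cons_succ]
  · simp only [pow_zero, List.getD_cons_zero]
    split <;> simp_all

lemma pv_natInner_shift (xs : List String) (i : Nat) (a b : List Char) :
    pvNatInner xs i (a, b)
      = (a ++ (pvNatInner xs i ([], [])).1, b ++ (pvNatInner xs i ([], [])).2) := by
  induction xs generalizing i a b with
  | nil => simp [pvNatInner]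
  | cons x xs ih =>
    rw [pv_natInner_cons, pv_natInner_cons]
    by_cases h : i % 2 = 1
    · rw [if_pos h, if_pos h]
      dsimp only
      rw [ih (i / 2) (a ++ x.toList) b, ih (i / 2) ([] ++ x.toList) []]
      simp
    · rw [if_neg h, if_neg h]
      dsimp only
      rw [ih (i / 2) a (b ++ x.toList), ih (i / 2) [] ([] ++ x.toList)]
      simp
lemma pv_natInner_eq_bitsplit (xs : List String) (i : Nat) :
    pvNatInner xs i ([], []) = pvBitsplit xs i := by
  induction xs generalizing i with
  | nil => simp [pvNatInner, pvBitsplit]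
  | cons x xs ih =>
    rw [pv_natInner_cons, pvBitsplit]
    by_cases h : i % 2 = 1
    · rw [if_pos h, if_pos h]
      dsimp only
      rw [pv_natInner_shift xs (i / 2) ([] ++ x.toList) [], ih]
      simp
    · rw [if_neg h, if_neg h]
      dsimp only
      rw [pv_natInner_shift xs (i / 2) [] ([] ++ x.toList), ih]
      simp
lemma pv_range_double {α : Type} (m : Nat) (f : Nat → α) :
    (List.range (2 * m)).map f
      = (List.range m).flatMap (fun i => [f (2 * i), f (2 * i + 1)]) := by
  induction m with
  | zero => simp
  | succ m ih =>
    rw [show 2 * (m + 1) = (2 * m + 1) + 1 by omega, List.range_succ, List.range_succ,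
      List.range_succ]
    simp [ih]
lemma pv_map_bitsplit (xs : List String) :
    (List.range (2 ^ xs.length)).map (pvBitsplit xs) = pvSplit xs := by
  induction xs with
  | nil => simp [pvBitsplit, pvSplit]
  | cons x xs ih =>
    rw [show (2 : Nat) ^ (x :: xs).length = 2 * 2 ^ xs.length by
      simp [List.length_cons]; ring]
    rw [pv_range_double]
    have hstep : ∀ i : Nat,
        (fun i => [pvBitsplit (x :: xs) (2 * i), pvBitsplit (x :: xs) (2 * i + 1)]) i
          = (fun lr => [(lr.1, x.toList ++ lr.2), (x.toList ++ lr.1, lr.2)]) (pvBitsplit xs i) := by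
      intro i
      have h1 : (2 * i) % 2 = 0 := by omega
      have h2 : (2 * i) / 2 = i := by omega
      have h3 : (2 * i + 1) % 2 = 1 := by omega
      have h4 : (2 * i + 1) / 2 = i := by omega
      simp [pvBitsplit, h1, h2, h3, h4]
    rw [funext hstep, pvSplit, ← ih, List.flatMap_map]

-- Etape 4: A's nested append loop is the flatMap of the pair maps
lemma pv_cross (nul nor : List (List Char × List Char)) :
    nul.foldl
        (fun acc ci =>
          nor.foldl (fun acc2 cj => acc2 ++ [(ci.1 ++ cj.1, ci.2 ++ cj.2)]) acc) []
      = nul.flatMap (fun c => nor.map (fun d => (c.1 ++ d.1, c.2 ++ d.2))) := by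
  have h : (fun (acc : List (List Char × List Char)) (ci : List Char × List Char) =>
        nor.foldl (fun acc2 cj => acc2 ++ [(ci.1 ++ cj.1, ci.2 ++ cj.2)]) acc)
      = fun acc ci => acc ++ nor.map (fun d => (ci.1 ++ d.1, ci.2 ++ d.2)) := by
    funext acc ci
    exact PySem.List.foldl_append_singleton_eq_map _ nor acc
  rw [h, PySem.List.foldl_append_eq_flatMap]
  simp

-- the whole of Etape 3 equals pvSplit
lemma pv_etape3 (ys : List String) :
    (PySem.List.pyRange 0 ((2 : Int) ^ ys.length) 1).foldl
        (fun acc i =>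
          let rs := (PySem.List.pyRange 0 (ys.length : Int) 1).foldl
            (fun (rs : List Char × List Char) j =>
              if PySem.Int.band i ((2 : Int) ^ j.toNat) = (2 : Int) ^ j.toNat then
                (rs.1 ++ (PySem.List.pyGetD ys j "").toList, rs.2)
              else
                (rs.1, rs.2 ++ (PySem.List.pyGetD ys j "").toList))
            ([], [])
          acc ++ [rs]) []
      = pvSplit ys := by
  rw [show ((2 : Int) ^ ys.length) = ((2 ^ ys.length : Nat) : Int) by push_cast; ring]
  rw [PySem.List.foldl_append_singleton_eq_map, PySem.List.pyRange_zero_nat (2 ^ ys.length),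
    List.map_map, List.nil_append]
  rw [← pv_map_bitsplit ys]
  apply List.map_congr_left
  intro i _
  simp only [Function.comp_apply]
  rw [pv_innerA_eq_natInner ys i, pv_natInner_eq_bitsplit]

-- ===== VERDICT (by name: the statement is the Claim_ definition above) =====
theorem liste_des_partitions_spec : Claim_equal_liste_des_partitions := by
  intro L _
  unfold Spec_liste_des_partitions
  by_cases hL : L = []
  · simp [liste_des_partitions, liste_des_partitions_alt, hL]
  · unfold liste_des_partitions liste_des_partitions_alt
    simp only [hL, if_false]
    rw [pv_step1]
    simp only [Nat.zero_add, List.nil_append]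
    set normales := L.filter (fun p => p ≠ "0.") with hnormales
    have hn : L.countP (fun p => p == "0.") = L.length - normales.length := pv_count_len L
    rw [hn]
    set n := L.length - normales.length with hnn
    have hnul :
        (if n ≠ 0 then
          (let r2 := (List.range n).foldl (fun r _ => r ++ ['0', '.']) []
           let r1 : List Char := []
           let st2 := (List.range n).foldl
            (fun (st : List (List Char × List Char) × List Char × List Char) _ =>
              let r1' := st.2.1 ++ ['0', '.']
              let r2' := PySem.List.slice st.2.2 none (some (-2))
              (st.1 ++ [(r1', r2')], r1', r2'))
            ([(r1, r2)], r1, r2)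
           st2.1)
         else [])
        = (if n ≠ 0 then (List.range (n + 1)).map (fun k => (pvRep k, pvRep (n - k))) else []) := by
      by_cases h : n = 0
      · simp [h]
      · simp only [h, ne_eq, not_false_iff, if_true]
        rw [pv_rep_init n ([] : List Char)]
        simp only [List.nil_append]
        rw [pv_nulles_loop n n le_rfl]
    have hm : (normales.length ≠ 0) ↔ (normales ≠ []) := by
      simp [List.length_eq_zero_iff]
    have hnorm :
        (if normales.length ≠ 0 then
          (PySem.List.pyRange 0 ((2 : Int) ^ normales.length) 1).foldl
            (fun acc i =>
              let rs := (PySem.List.pyRange 0 (normales.length : Int) 1).foldl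
                (fun (rs : List Char × List Char) j =>
                  if PySem.Int.band i ((2 : Int) ^ j.toNat) = (2 : Int) ^ j.toNat then
                    (rs.1 ++ (PySem.List.pyGetD normales j "").toList, rs.2)
                  else
                    (rs.1, rs.2 ++ (PySem.List.pyGetD normales j "").toList))
                ([], [])
              acc ++ [rs]) []
         else [])
        = (if normales ≠ [] then pvSplit normales else []) := by
      by_cases h : normales = []
      · simp [h]
      · rw [if_pos (hm.mpr h), if_pos h]
        exact pv_etape3 normales
    rw [hnul, hnorm, pv_cross]
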